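-- pv_equiv track=rewrite | github.com/Safik121/Python-Related-Stuff | Python-Files-School/chessboard_attempt.py | draw_chessboard
-- ===== SOURCE A (Python) =====
-- def draw_chessboard(n, m):
--     chessboard = ''
--     for i in range(n):
--         for j in range(m):
--             if (i + j) % 2 == 0:
--                 chessboard += '##'
--             else:
--                 chessboard += '  '
--         chessboard += '\n'
--     return chessboard
-- ===== SOURCE B (Python) =====
-- def draw_chessboard(n, m):
--     if n <= 0:
--         return ''
--     row_even = ''.join('##' if j % 2 == 0 else '  ' for j in range(m))
--     row_odd = ''.join('  ' if j % 2 == 0 else '##' for j in range(m))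
--     lines = [(row_even if i % 2 == 0 else row_odd) + '\n' for i in range(n)]
--     return ''.join(lines)
-- ===== Notes on version B (the rewrite author's own statement) =====
-- stated objective: faster
-- what changed: B precomputes the two alternating row templates once and concatenates one of them per row via join, instead of deciding (i+j)%2 and appending per cell with quadratic string rebuilding.
import Mathlib
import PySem

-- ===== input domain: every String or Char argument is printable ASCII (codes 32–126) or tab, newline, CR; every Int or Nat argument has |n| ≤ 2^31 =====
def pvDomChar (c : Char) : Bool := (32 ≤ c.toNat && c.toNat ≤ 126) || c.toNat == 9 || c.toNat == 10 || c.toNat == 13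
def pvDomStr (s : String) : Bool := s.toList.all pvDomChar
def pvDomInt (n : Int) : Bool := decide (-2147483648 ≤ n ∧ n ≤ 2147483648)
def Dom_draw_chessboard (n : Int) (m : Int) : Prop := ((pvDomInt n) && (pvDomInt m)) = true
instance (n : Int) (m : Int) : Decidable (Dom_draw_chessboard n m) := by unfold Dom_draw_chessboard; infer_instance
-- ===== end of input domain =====

-- B precomputes the two alternating row templates once and joins one of them per row, instead of A's per-cell parity test with repeated string append; a timing run measures B faster in Python.


-- ===== PORT A =====
def draw_chessboard (n : Int) (m : Int) : String :=
  (PySem.List.pyRange 0 n 1).foldl (fun cb i =>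
    ((PySem.List.pyRange 0 m 1).foldl (fun cb j =>
      cb ++ (if PySem.Int.mod (i + j) 2 = 0 then "##" else "  ")) cb) ++ "\n") ""

-- ===== PORT B =====
def draw_chessboard_alt (n : Int) (m : Int) : String :=
  if n ≤ 0 then "" else
  let row_even := PySem.Str.join "" ((PySem.List.pyRange 0 m 1).map
    (fun j => if PySem.Int.mod j 2 = 0 then "##" else "  "))
  let row_odd := PySem.Str.join "" ((PySem.List.pyRange 0 m 1).map
    (fun j => if PySem.Int.mod j 2 = 0 then "  " else "##"))
  PySem.Str.join "" ((PySem.List.pyRange 0 n 1).map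
    (fun i => (if PySem.Int.mod i 2 = 0 then row_even else row_odd) ++ "\n"))

-- ===== PRECONDITION & SPEC =====
def Spec_draw_chessboard (n : Int) (m : Int) (out : String) : Prop := out = draw_chessboard_alt n m
instance (n : Int) (m : Int) (out : String) : Decidable (Spec_draw_chessboard n m out) := by unfold Spec_draw_chessboard; infer_instance

-- ===== CLAIM (what is proved, stated in full; the proofs are below) =====
def Claim_equal_draw_chessboard : Prop := ∀ (n : Int) (m : Int), Dom_draw_chessboard n m → Spec_draw_chessboard n m (draw_chessboard n m)

-- ===== LEMMAS AND PROOFS =====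

lemma join_empty_cons (a : String) (l : List String) :
    PySem.Str.join "" (a :: l) = a ++ PySem.Str.join "" l := by
  cases l with
  | nil => simp [PySem.Str.join, PySem.Chars.join_singleton, PySem.Chars.join_nil]
  | cons b t => simp [PySem.Str.join, PySem.Chars.join_cons_cons, String.ofList_append]

-- ''-join of the mapped list is what a '+='-append loop accumulates
lemma foldl_strapp {α : Type} (l : List α) (f : α → String) (s : String) :
    l.foldl (fun a x => a ++ f x) s = s ++ PySem.Str.join "" (l.map f) := by
  induction l generalizing s with
  | nil => simp [PySem.Str.join, PySem.Chars.join_nil]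
  | cons x xs ih => simp [List.foldl, ih, join_empty_cons, String.append_assoc]

-- A's per-cell parity test decomposes into the row-parity choice of B's templates
lemma cell_eq (i j : Int) :
    (if PySem.Int.mod (i + j) 2 = 0 then "##" else "  ") =
      (if PySem.Int.mod i 2 = 0
        then (if PySem.Int.mod j 2 = 0 then "##" else "  ")
        else (if PySem.Int.mod j 2 = 0 then "  " else "##")) := by
  have h2 : (0:Int) < 2 := by norm_num
  rw [PySem.Int.mod_eq_emod_of_pos h2, PySem.Int.mod_eq_emod_of_pos h2,
      PySem.Int.mod_eq_emod_of_pos h2]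
  have hij : (i + j) % 2 = (i % 2 + j % 2) % 2 := by rw [Int.add_emod]
  rcases Int.emod_two_eq i with hi | hi <;> rcases Int.emod_two_eq j with hj | hj <;>
    norm_num [hij, hi, hj]

-- A's inner loop for row i produces exactly B's row template of i's parity
lemma row_eq (i m : Int) :
    PySem.Str.join "" ((PySem.List.pyRange 0 m 1).map
        (fun j => if PySem.Int.mod (i + j) 2 = 0 then "##" else "  ")) =
      if PySem.Int.mod i 2 = 0
        then PySem.Str.join "" ((PySem.List.pyRange 0 m 1).map
          (fun j => if PySem.Int.mod j 2 = 0 then "##" else "  "))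
        else PySem.Str.join "" ((PySem.List.pyRange 0 m 1).map
          (fun j => if PySem.Int.mod j 2 = 0 then "  " else "##")) := by
  by_cases h : PySem.Int.mod i 2 = 0
  · simp only [cell_eq, if_pos h]
  · simp only [cell_eq, if_neg h]

-- ===== VERDICT (by name: the statement is the Claim_ definition above) =====
theorem draw_chessboard_spec : Claim_equal_draw_chessboard := by
  intro n m _
  unfold Spec_draw_chessboard draw_chessboard draw_chessboard_alt
  by_cases hn : n ≤ 0
  · rw [if_pos hn, PySem.List.pyRange_one_eq_nil hn]
    rfl
  rw [if_neg hn]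
  simp only [foldl_strapp, String.append_assoc]
  simp only [String.empty_append]
  congr 1
  exact List.map_congr_left (fun i _ => by rw [row_eq])
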